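-- pv_equiv track=rewrite | github.com/DiwakarRDivu7/ShellSummary | transform/GenesisVendor.py | get_genesis_TOS_search
-- ===== SOURCE A (Python) =====
-- def get_genesis_TOS_search(service_desc, serviceList):
--     TOS = ""
--     temp = []
--     cnt = 0
--
--     if service_desc is not None:
--         for service in serviceList:
--             if service.lower() in service_desc.lower():
--                 cnt += 1
--                 temp = temp + [service]
--
--     if len(temp) > 0:
--         TOS = max(temp, key=len)
--
--     if TOS == "":
--         TOS = service_desc
--
--     return TOS
-- ===== SOURCE B (Python) =====
-- def get_genesis_TOS_search(service_desc, serviceList):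
--     if service_desc is None:
--         return None
--     hay = service_desc.lower()
--     for service in sorted(serviceList, key=len, reverse=True):
--         if service and service.lower() in hay:
--             return service
--     return service_desc
-- ===== Notes on version B (the rewrite author's own statement) =====
-- stated objective: faster
-- what changed: Instead of collecting every match into a list via repeated quadratic list concatenation and then taking max(key=len), B sorts the candidates by length descending (stable, so ties keep original order) and returns the first non-empty one whose lowercase form is a substring of the description, early-exiting; None is guarded up front.
import Mathlib
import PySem

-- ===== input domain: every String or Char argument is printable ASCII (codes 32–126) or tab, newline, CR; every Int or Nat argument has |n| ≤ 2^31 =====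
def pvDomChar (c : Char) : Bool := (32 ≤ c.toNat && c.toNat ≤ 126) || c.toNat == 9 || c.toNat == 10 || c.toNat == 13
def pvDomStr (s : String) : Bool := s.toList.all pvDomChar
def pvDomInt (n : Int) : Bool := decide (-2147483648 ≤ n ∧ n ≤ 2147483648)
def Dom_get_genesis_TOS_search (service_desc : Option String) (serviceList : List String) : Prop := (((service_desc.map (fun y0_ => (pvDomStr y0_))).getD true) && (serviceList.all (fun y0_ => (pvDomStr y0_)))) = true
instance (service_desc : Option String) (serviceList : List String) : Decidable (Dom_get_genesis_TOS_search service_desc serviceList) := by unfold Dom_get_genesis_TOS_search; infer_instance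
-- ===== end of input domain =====

-- B replaces A's collect-all-matches-then-max(key=len) with a stable sort by length descending
-- followed by an early-exit scan returning the first non-empty lowercase-substring match, avoiding A's quadratic repeated list concatenation (measured faster).


-- ===== PORT A =====
def get_genesis_TOS_search (service_desc : Option String) (serviceList : List String) : Option String :=
  -- TOS = ""; temp = []; cnt = 0; the loop runs only when service_desc is not None
  let st : Int × List String :=
    match service_desc with
    | none => (0, [])
    | some d =>
        serviceList.foldl
          (fun st service =>
            if PySem.Str.isIn (PySem.Str.lower service) (PySem.Str.lower d) = true then
              (st.1 + 1, st.2 ++ [service])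
            else st)
          (0, [])
  let temp := st.2
  -- if len(temp) > 0: TOS = max(temp, key=len)
  let TOS : String := if temp.length > 0 then (PySem.List.max? temp PySem.Str.len).getD "" else ""
  -- if TOS == "": TOS = service_desc
  if TOS = "" then service_desc else some TOS

-- ===== PORT B =====
def get_genesis_TOS_search_alt (service_desc : Option String) (serviceList : List String) : Option String :=
  match service_desc with
  | none => none
  | some d =>
      let hay := PySem.Str.lower d
      -- for service in sorted(serviceList, key=len, reverse=True): early return on first hit
      match (PySem.List.sorted serviceList PySem.Str.len true).find?
              (fun service => !(service == "") && PySem.Str.isIn (PySem.Str.lower service) hay) with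
      | some service => some service
      | none => some d

-- ===== PRECONDITION & SPEC =====
def Spec_get_genesis_TOS_search (service_desc : Option String) (serviceList : List String) (out : Option String) : Prop := out = get_genesis_TOS_search_alt service_desc serviceList
instance (service_desc : Option String) (serviceList : List String) (out : Option String) : Decidable (Spec_get_genesis_TOS_search service_desc serviceList out) := by unfold Spec_get_genesis_TOS_search; infer_instance

-- ===== CLAIM (what is proved, stated in full; the proofs are below) =====
def Claim_equal_get_genesis_TOS_search : Prop := ∀ (service_desc : Option String) (serviceList : List String), Dom_get_genesis_TOS_search service_desc serviceList → Spec_get_genesis_TOS_search service_desc serviceList (get_genesis_TOS_search service_desc serviceList)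

-- ===== LEMMAS AND PROOFS =====

-- the running first-max-of-matches fold both programs are reduced to
def pvBest (p : String → Bool) (l : List String) : String :=
  l.foldl (fun best s => if PySem.Str.len best < PySem.Str.len s ∧ p s = true then s else best) ""

theorem pvInsertBy_nil {α : Type} (before : α → α → Bool) (x : α) :
    PySem.List.insertBy before x [] = [x] := rfl

theorem pvInsertBy_cons {α : Type} (before : α → α → Bool) (x y : α) (ys : List α) :
    PySem.List.insertBy before x (y :: ys)
      = if before x y then x :: y :: ys else y :: PySem.List.insertBy before x ys := rfl

theorem pvLenNonneg (s : String) : 0 ≤ PySem.Str.len s := by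
  rw [PySem.Str.len_eq]; exact Int.natCast_nonneg _

theorem pvLenEmpty : PySem.Str.len "" = 0 := by rw [PySem.Str.len_eq]; rfl

theorem pvLenPos (s : String) (h : s ≠ "") : 0 < PySem.Str.len s := by
  rw [PySem.Str.len_eq]
  have : s.toList ≠ [] := fun hn => h (by cases s; simp_all)
  cases hl : s.toList with
  | nil => exact absurd hl this
  | cons a t => simp

-- inserting an element the scan skips does not change find?
theorem pvFindInsertNo (q : String → Bool) (before : String → String → Bool) (x : String)
    (hx : q x = false) (ys : List String) :
    (PySem.List.insertBy before x ys).find? q = ys.find? q := by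
  induction ys with
  | nil => simp [pvInsertBy_nil, List.find?, hx]
  | cons y t ih =>
      rw [pvInsertBy_cons]
      by_cases hb : before x y = true
      · simp [hb, List.find?, hx]
      · cases hq : q y with
        | true => simp [hb, List.find?, hq]
        | false => simp [hb, List.find?, hq, ih]

-- inserting a hit x into a length-descending list: find? becomes "x if it is strictly longer than the old hit"
theorem pvFindInsertYes (q : String → Bool) (x : String) (hx : q x = true) :
    ∀ ys : List String, ys.Pairwise (fun a b => PySem.Str.len b ≤ PySem.Str.len a) →
    (PySem.List.insertBy (fun a b => decide (PySem.Str.len b < PySem.Str.len a)) x ys).find? q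
      = match ys.find? q with
        | none => some x
        | some b => if PySem.Str.len b < PySem.Str.len x then some x else some b := by
  intro ys
  induction ys with
  | nil => intro _; simp [pvInsertBy_nil, List.find?, hx]
  | cons y t ih =>
      intro hp
      obtain ⟨hphead, hptail⟩ := List.pairwise_cons.mp hp
      rw [pvInsertBy_cons]
      by_cases hlt : PySem.Str.len y < PySem.Str.len x
      · rw [if_pos (by simpa using hlt), List.find?_cons_of_pos hx]
        cases hq : q y with
        | true =>
            rw [List.find?_cons_of_pos hq]
            exact (if_pos hlt).symm
        | false =>
            rw [List.find?_cons_of_neg (by simp [hq])]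
            cases hf : t.find? q with
            | none => rfl
            | some b =>
                have hbx : PySem.Str.len b < PySem.Str.len x :=
                  lt_of_le_of_lt (hphead b (List.mem_of_find?_eq_some hf)) hlt
                exact (if_pos hbx).symm
      · rw [if_neg (by simpa using hlt)]
        cases hq : q y with
        | true =>
            rw [List.find?_cons_of_pos hq, List.find?_cons_of_pos hq]
            exact (if_neg hlt).symm
        | false =>
            rw [List.find?_cons_of_neg (by simp [hq]), List.find?_cons_of_neg (by simp [hq])]
            exact ih hptail

-- the early-exit scan of the stable length-descending sort computes the running first-max of matches
theorem pvMain (p : String → Bool) (l : List String) :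
    (PySem.List.sorted l PySem.Str.len true).find? (fun s => !(s == "") && p s)
      = (if pvBest p l = "" then none else some (pvBest p l)) := by
  induction l using List.reverseRecOn with
  | nil => simp [PySem.List.sorted, pvBest]
  | append_singleton l x ih =>
      have hsorted : PySem.List.sorted (l ++ [x]) PySem.Str.len true
          = PySem.List.insertBy (fun a b => decide (PySem.Str.len b < PySem.Str.len a)) x
              (PySem.List.sorted l PySem.Str.len true) := by
        rw [PySem.List.sorted_rev_eq_foldl_insertBy, PySem.List.sorted_rev_eq_foldl_insertBy,
            List.foldl_append]
        rfl
      have hbest : pvBest p (l ++ [x])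
          = (if PySem.Str.len (pvBest p l) < PySem.Str.len x ∧ p x = true then x else pvBest p l) := by
        unfold pvBest; rw [List.foldl_append]; rfl
      rw [hsorted, hbest]
      by_cases hxe : x = ""
      · -- an empty candidate is skipped by the scan and never beats the running best
        have hqx : (fun s => !(s == "") && p s) x = false := by simp [hxe]
        have hA : ¬(PySem.Str.len (pvBest p l) < PySem.Str.len x ∧ p x = true) := by
          intro h
          rw [hxe, pvLenEmpty] at h
          exact absurd h.1 (not_lt.mpr (pvLenNonneg _))
        rw [pvFindInsertNo _ _ x hqx, ih]
        simp only [if_neg hA]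
      · by_cases hpx : p x = true
        · -- a genuine hit: the insert lemma applies
          have hqx : (fun s => !(s == "") && p s) x = true := by simp [hxe, hpx]
          rw [pvFindInsertYes _ x hqx _ (PySem.List.sorted_pairwise_rev l PySem.Str.len)]
          by_cases hb : pvBest p l = ""
          · have hfind : (PySem.List.sorted l PySem.Str.len true).find? (fun s => !(s == "") && p s) = none := by
              rw [ih, if_pos hb]
            have hlt : PySem.Str.len (pvBest p l) < PySem.Str.len x := by
              rw [hb, pvLenEmpty]; exact pvLenPos x hxe
            have hA : PySem.Str.len (pvBest p l) < PySem.Str.len x ∧ p x = true := ⟨hlt, hpx⟩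
            simp only [hfind, if_pos hA, if_neg hxe]
          · have hfind : (PySem.List.sorted l PySem.Str.len true).find? (fun s => !(s == "") && p s) = some (pvBest p l) := by
              rw [ih, if_neg hb]
            simp only [hfind]
            by_cases hlt : PySem.Str.len (pvBest p l) < PySem.Str.len x
            · have hA : PySem.Str.len (pvBest p l) < PySem.Str.len x ∧ p x = true := ⟨hlt, hpx⟩
              simp only [if_pos hlt, if_pos hA, if_neg hxe]
            · have hA : ¬(PySem.Str.len (pvBest p l) < PySem.Str.len x ∧ p x = true) := fun h => hlt h.1
              simp only [if_neg hlt, if_neg hA, if_neg hb]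
        · -- not a substring: skipped by the scan, rejected by the fold
          have hqx : (fun s => !(s == "") && p s) x = false := by simp [hpx]
          have hA : ¬(PySem.Str.len (pvBest p l) < PySem.Str.len x ∧ p x = true) := fun h => hpx h.2
          rw [pvFindInsertNo _ _ x hqx, ih]
          simp only [if_neg hA]

-- A's pair fold (cnt, temp): the second component collects exactly the services satisfying p
theorem pvTempA (p : String → Bool) (l : List String) (c : Int) (acc : List String) :
    (l.foldl
      (fun (st : Int × List String) s => if p s = true then (st.1 + 1, st.2 ++ [s]) else st)
      (c, acc)).2
    = acc ++ l.filter p := by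
  induction l generalizing c acc with
  | nil => simp
  | cons x t ih =>
      cases h : p x with
      | true => simp [h, ih]
      | false => simp [h, ih]

-- the running best-so-far fold skips services failing p, so it is the plain fold over the filtered list
theorem pvFoldB (C : String → String → Prop) [DecidableRel C] (p : String → Bool)
    (l : List String) (b : String) :
    l.foldl (fun best s => if C best s ∧ p s = true then s else best) b
    = (l.filter p).foldl (fun best s => if C best s then s else best) b := by
  induction l generalizing b with
  | nil => rfl
  | cons x t ih =>
      cases h : p x with
      | true => simp [List.foldl_cons, h, ih]
      | false => simp [List.foldl_cons, h, ih]

-- the running max?(·, key) fold over a nonempty list is the best-so-far fold from its head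
theorem pvMaxFoldSome (f : Option String → String → Option String)
    (g : String → String → String)
    (hsome : ∀ b s, f (some b) s = some (g b s))
    (l : List String) (b : String) :
    l.foldl f (some b) = some (l.foldl g b) := by
  induction l generalizing b with
  | nil => rfl
  | cons x t ih => rw [List.foldl_cons, hsome, List.foldl_cons]; exact ih _

theorem pvMaxFold (f : Option String → String → Option String)
    (g : String → String → String)
    (hnone : ∀ s, f none s = some s)
    (hsome : ∀ b s, f (some b) s = some (g b s))
    (x : String) (t : List String) :
    List.foldl f none (x :: t) = some (t.foldl g x) := by
  rw [List.foldl_cons, hnone]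
  exact pvMaxFoldSome f g hsome t x

theorem pvLenZero (s : String) (h : PySem.Str.len s = 0) : s = "" := by
  rw [PySem.Str.len_eq] at h
  have hl : s.toList = [] := by
    cases hl : s.toList with
    | nil => rfl
    | cons a t => exfalso; rw [hl] at h; simp only [List.length_cons] at h; omega
  cases s; simp_all

-- the best-so-far step started from "" just takes the element
theorem pvStepEmpty (x : String) :
    (if PySem.Str.len "" < PySem.Str.len x then x else "") = x := by
  by_cases h : PySem.Str.len "" < PySem.Str.len x
  · rw [if_pos h]
  · rw [if_neg h]
    have he : PySem.Str.len "" = 0 := pvLenEmpty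
    have hx : (0:Int) ≤ PySem.Str.len x := pvLenNonneg x
    exact (pvLenZero x (by omega)).symm

-- A on a present description reduces to the running first-max of matches
theorem pvAform (d : String) (l : List String) :
    get_genesis_TOS_search (some d) l
      = (if pvBest (fun s => PySem.Str.isIn (PySem.Str.lower s) (PySem.Str.lower d)) l = ""
         then some d
         else some (pvBest (fun s => PySem.Str.isIn (PySem.Str.lower s) (PySem.Str.lower d)) l)) := by
  unfold get_genesis_TOS_search pvBest
  dsimp only
  rw [pvTempA (fun s => PySem.Str.isIn (PySem.Str.lower s) (PySem.Str.lower d)) l 0 [],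
      pvFoldB (fun b s => PySem.Str.len b < PySem.Str.len s)
              (fun s => PySem.Str.isIn (PySem.Str.lower s) (PySem.Str.lower d)) l "",
      List.nil_append]
  cases hl : l.filter (fun s => PySem.Str.isIn (PySem.Str.lower s) (PySem.Str.lower d)) with
  | nil => simp
  | cons x t =>
      have hmax : PySem.List.max? (x :: t) PySem.Str.len
          = some (t.foldl (fun best s => if PySem.Str.len best < PySem.Str.len s then s else best) x) := by
        unfold PySem.List.max?
        exact pvMaxFold _ _ (fun s => rfl)
          (fun b s => (apply_ite some (PySem.Str.len b < PySem.Str.len s) s b).symm) x t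
      rw [List.foldl_cons, pvStepEmpty, List.length_cons]
      simp [hmax]

-- ===== VERDICT (by name: the statement is the Claim_ definition above) =====
theorem get_genesis_TOS_search_spec : Claim_equal_get_genesis_TOS_search := by
  intro sd sl _
  unfold Spec_get_genesis_TOS_search
  cases sd with
  | none => rfl
  | some d =>
      rw [pvAform]
      unfold get_genesis_TOS_search_alt
      dsimp only
      rw [pvMain (fun s => PySem.Str.isIn (PySem.Str.lower s) (PySem.Str.lower d)) sl]
      by_cases hb : pvBest (fun s => PySem.Str.isIn (PySem.Str.lower s) (PySem.Str.lower d)) sl = ""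
      · rw [if_pos hb, if_pos hb]
      · rw [if_neg hb, if_neg hb]
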